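-- pv_equiv track=rewrite | github.com/ionutdrg45/Bac2020Problems | sub3ex1.py | duplicare
-- ===== SOURCE A (Python) =====
-- def duplicare(n,d = 0):
--     p = 1
--     while(n != 0):
--         if n % 10 % 2 != 0:
--             d = (n % 10) * p + d
--             p *= 10
--             d = (n % 10) * p + d
--         else:
--             d = (n % 10) * p + d
--         n = int(n/10)
--         p *= 10
--     return d
-- ===== SOURCE B (Python) =====
-- def duplicare(n, d=0):
--     # collect the decimal digits of n, least-significant first
--     ds = []
--     while True:
--         ds.append(n % 10)
--         n //= 10
--         if n == 0:
--             break
--     # rebuild the number most-significant-first, widening by an extra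
--     # decimal place whenever the digit is odd (odd digits appear twice)
--     out = 0
--     for r in reversed(ds):
--         out = out * (100 if r % 2 != 0 else 10) + r * (11 if r % 2 != 0 else 1)
--     return out + d
-- ===== Notes on version B (the rewrite author's own statement) =====
-- stated objective: alternative
-- what changed: B first collects the decimal digits into a list (one divmod pass) and then rebuilds the result most-significant-first, widening the accumulator by an extra decimal place for each odd digit, instead of A's single least-significant-first loop that maintains a positional power-of-ten accumulator p and adds each odd digit in twice.
-- outside the precondition, e.g. on duplicare(-13, 0): A returns 9977, B does not finish within the time limit; on duplicare(-1, 5): A returns 104, B does not finish within the time limit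
import Mathlib
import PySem

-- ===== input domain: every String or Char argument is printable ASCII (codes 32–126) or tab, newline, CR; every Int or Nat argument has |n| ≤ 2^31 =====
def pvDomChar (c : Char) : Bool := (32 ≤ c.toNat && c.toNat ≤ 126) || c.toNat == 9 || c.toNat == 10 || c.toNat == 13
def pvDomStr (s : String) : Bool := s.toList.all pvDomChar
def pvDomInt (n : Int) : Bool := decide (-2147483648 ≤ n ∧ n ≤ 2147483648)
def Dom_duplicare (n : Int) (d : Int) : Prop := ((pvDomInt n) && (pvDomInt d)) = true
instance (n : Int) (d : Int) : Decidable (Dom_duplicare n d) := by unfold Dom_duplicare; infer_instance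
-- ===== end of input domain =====

-- B collects the decimal digit list first and then rebuilds the number most-significant-first
-- with no positional power accumulator (objective: alternative); equivalence is claimed for 0 ≤ n.


-- ===== PORT A =====
-- the while loop of A over the state (n, d, p); 'int(n/10)' is truncating division
-- (PySem.Int.truncdiv, exact on this domain).  The fuel argument only makes the
-- recursion total: |n| shrinks by a factor 10 each step, so |n| + 1 steps always suffice.
def duplicareLoop : Nat → Int → Int → Int → Int
  | 0, _, d, _ => d
  | fuel + 1, n, d, p =>
    if n = 0 then d
    else
      if PySem.Int.mod (PySem.Int.mod n 10) 2 ≠ 0 then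
        -- d = r*p + d; p *= 10; d = r*p + d; then n = int(n/10); p *= 10
        duplicareLoop fuel (PySem.Int.truncdiv n 10)
          ((PySem.Int.mod n 10) * (p * 10) + ((PySem.Int.mod n 10) * p + d)) (p * 10 * 10)
      else
        duplicareLoop fuel (PySem.Int.truncdiv n 10) ((PySem.Int.mod n 10) * p + d) (p * 10)

def duplicare (n : Int) (d : Int) : Int := duplicareLoop (n.natAbs + 1) n d 1

-- ===== PORT B =====
-- B's "while True: ds.append(n % 10); n //= 10; if n == 0: break" loop; the fuel
-- argument only makes the recursion total (n + 1 steps always suffice when 0 ≤ n).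
def digitsLoop : Nat → Int → List Int → List Int
  | 0, _, ds => ds
  | fuel + 1, n, ds =>
    let ds' := ds ++ [PySem.Int.mod n 10]
    let n' := PySem.Int.floordiv n 10
    if n' = 0 then ds' else digitsLoop fuel n' ds'

def duplicare_alt (n : Int) (d : Int) : Int :=
  let ds := digitsLoop (n.natAbs + 1) n []
  let out := ds.reverse.foldl
    (fun out r =>
      out * (if PySem.Int.mod r 2 ≠ 0 then 100 else 10)
        + r * (if PySem.Int.mod r 2 ≠ 0 then 11 else 1)) 0
  out + d

-- ===== PRECONDITION & SPEC =====
-- Pre_ excludes negative n, where A's returned value mixes floor-mod digits with truncating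
-- 'int(n/10)' (an artefact of that mixture) and where B's 'n //= 10' loop never reaches 0
-- and so does not terminate.
def Pre_duplicare (n : Int) (d : Int) : Prop := 0 ≤ n
instance (n : Int) (d : Int) : Decidable (Pre_duplicare n d) := by unfold Pre_duplicare; infer_instance

def pvWitness_duplicare : Int × Int := (35, 4)

def Spec_duplicare (n : Int) (d : Int) (out : Int) : Prop := out = duplicare_alt n d
instance (n : Int) (d : Int) (out : Int) : Decidable (Spec_duplicare n d out) := by unfold Spec_duplicare; infer_instance

-- ===== CLAIM (what is proved, stated in full; the proofs are below) =====
def Claim_equal_duplicare : Prop := ∀ (n : Int) (d : Int), Dom_duplicare n d → Pre_duplicare n d → Spec_duplicare n d (duplicare n d)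

-- ===== LEMMAS AND PROOFS =====

-- the common value: the decimal digits of m with every odd digit written twice
def pvDup (m : Nat) : Int :=
  if h : m = 0 then 0
  else
    pvDup (m / 10) * (if m % 10 % 2 = 1 then 100 else 10)
      + ((m % 10 : Nat) : Int) * (if m % 10 % 2 = 1 then 11 else 1)
termination_by m
decreasing_by exact Nat.div_lt_self (Nat.pos_of_ne_zero h) (by norm_num)

-- the decimal digits of m, least-significant first (B's first loop, fuel-free)
def pvDigits (m : Nat) : List Int :=
  if h : m / 10 = 0 then [((m % 10 : Nat) : Int)]
  else ((m % 10 : Nat) : Int) :: pvDigits (m / 10)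
termination_by m
decreasing_by omega

theorem pvModTenCast (m : Nat) : PySem.Int.mod (m : Int) 10 = ((m % 10 : Nat) : Int) := by
  rw [PySem.Int.mod_eq_emod_of_pos (by norm_num)]; omega

theorem pvFloordivTenCast (m : Nat) : PySem.Int.floordiv (m : Int) 10 = ((m / 10 : Nat) : Int) := by
  rw [PySem.Int.floordiv_eq_ediv_of_pos (by norm_num)]; omega

theorem pvTruncdivTenCast (m : Nat) : PySem.Int.truncdiv (m : Int) 10 = ((m / 10 : Nat) : Int) := rfl

theorem pvOddCond (r : Nat) : (PySem.Int.mod ((r : Nat) : Int) 2 ≠ 0) ↔ r % 2 = 1 := by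
  rw [PySem.Int.mod_eq_emod_of_pos (by norm_num)]; omega

theorem pvDup_zero : pvDup 0 = 0 := by rw [pvDup.eq_def]; simp

-- A's loop computes pvDup positionally (under any sufficient fuel)
theorem pvLoopA (fuel : Nat) : ∀ (m : Nat) (d p : Int), m < fuel →
    duplicareLoop fuel (m : Int) d p = pvDup m * p + d := by
  induction fuel with
  | zero => intro m d p h; omega
  | succ fuel ih =>
    intro m d p h
    simp only [duplicareLoop]
    by_cases h0 : m = 0
    · subst h0
      rw [pvDup_zero]
      norm_num
    · have hm : (m : Int) ≠ 0 := by exact_mod_cast h0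
      have hlt : m / 10 < m := Nat.div_lt_self (Nat.pos_of_ne_zero h0) (by norm_num)
      rw [if_neg hm, pvModTenCast, pvTruncdivTenCast]
      conv_rhs => rw [pvDup.eq_def]
      rw [dif_neg h0]
      by_cases hodd : m % 10 % 2 = 1
      · rw [if_pos ((pvOddCond (m % 10)).mpr (by omega)), ih (m / 10) _ _ (by omega),
          if_pos hodd, if_pos hodd]
        ring
      · rw [if_neg (fun hx => hodd ((pvOddCond (m % 10)).mp hx)), ih (m / 10) _ _ (by omega),
          if_neg hodd, if_neg hodd]
        ring

-- B's first loop produces the digit list (under any sufficient fuel)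
theorem pvLoopDigits (fuel : Nat) : ∀ (m : Nat) (ds : List Int), m < fuel →
    digitsLoop fuel (m : Int) ds = ds ++ pvDigits m := by
  induction fuel with
  | zero => intro m ds h; omega
  | succ fuel ih =>
    intro m ds h
    simp only [digitsLoop, pvModTenCast, pvFloordivTenCast]
    by_cases h10 : m / 10 = 0
    · rw [h10, pvDigits.eq_def, dif_pos h10]
      simp
    · have hne : ((m / 10 : Nat) : Int) ≠ 0 := by exact_mod_cast h10
      rw [if_neg hne, ih (m / 10) _ (by omega)]
      conv_rhs => rw [pvDigits.eq_def]
      rw [dif_neg h10]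
      simp

-- B's second loop folds the reversed digit list into pvDup
theorem pvFoldB (m : Nat) :
    (pvDigits m).reverse.foldl
      (fun out r =>
        out * (if PySem.Int.mod r 2 ≠ 0 then 100 else 10)
          + r * (if PySem.Int.mod r 2 ≠ 0 then 11 else 1)) 0 = pvDup m := by
  induction m using Nat.strong_induction_on with
  | _ m ih =>
    have hc := pvOddCond (m % 10)
    by_cases h10 : m / 10 = 0
    · rw [pvDigits.eq_def, dif_pos h10]
      simp only [List.reverse_cons, List.reverse_nil, List.nil_append,
        List.foldl_cons, List.foldl_nil]
      by_cases h0 : m = 0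
      · subst h0
        rw [pvDup_zero]
        decide
      · conv_rhs => rw [pvDup.eq_def]
        rw [dif_neg h0, h10, pvDup_zero]
        simp only [hc]
    · have h0 : m ≠ 0 := by omega
      rw [pvDigits.eq_def, dif_neg h10]
      simp only [List.reverse_cons, List.foldl_append, List.foldl_cons, List.foldl_nil]
      rw [ih (m / 10) (Nat.div_lt_self (Nat.pos_of_ne_zero h0) (by norm_num))]
      conv_rhs => rw [pvDup.eq_def]
      rw [dif_neg h0]
      simp only [hc]

-- ===== VERDICT (by name: the statement is the Claim_ definition above) =====
theorem duplicare_spec : Claim_equal_duplicare := by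
  intro n d _ hpre
  unfold Spec_duplicare
  obtain ⟨m, rfl⟩ : ∃ m : Nat, n = (m : Int) := ⟨n.toNat, (Int.toNat_of_nonneg hpre).symm⟩
  show duplicareLoop ((m : Int).natAbs + 1) (m : Int) d 1 = duplicare_alt (m : Int) d
  rw [Int.natAbs_natCast, pvLoopA (m + 1) m d 1 (by omega)]
  simp only [duplicare_alt, Int.natAbs_natCast]
  rw [pvLoopDigits (m + 1) m [] (by omega)]
  simp only [List.nil_append]
  rw [pvFoldB m]
  ring
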